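-- pv_equiv track=rewrite | github.com/coconutsRhealthy/image_openai | read_json_txt.py | create_url_screenshot_dict_from_txt
-- ===== SOURCE A (Python) =====
-- def create_url_screenshot_dict_from_txt(lines: list[str]) -> dict[str, list[str]]:
--     url_dict = {}
--     for line in lines:
--         if " - " not in line:
--             continue
--
--         key, value = line.split(" - ", 1)
--
--         if key not in url_dict:
--             url_dict[key] = []
--
--         url_dict[key].append(value)
--
--     return url_dict
-- ===== SOURCE B (Python) =====
-- def create_url_screenshot_dict_from_txt(lines: list[str]) -> dict[str, list[str]]:
--     pairs = [tuple(line.split(" - ", 1)) for line in lines if " - " in line]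
--     keys = dict.fromkeys(key for key, _ in pairs)
--     return {key: [value for k, value in pairs if k == key] for key in keys}
-- ===== Notes on version B (the rewrite author's own statement) =====
-- stated objective: alternative
-- what changed: Replaces the single-pass mutable dict-of-lists accumulation by a split/dedup/group decomposition: split all ' - ' lines into pairs once, take the keys in first-occurrence order, and build each group by a per-key scan of the pair list.
import Mathlib
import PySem

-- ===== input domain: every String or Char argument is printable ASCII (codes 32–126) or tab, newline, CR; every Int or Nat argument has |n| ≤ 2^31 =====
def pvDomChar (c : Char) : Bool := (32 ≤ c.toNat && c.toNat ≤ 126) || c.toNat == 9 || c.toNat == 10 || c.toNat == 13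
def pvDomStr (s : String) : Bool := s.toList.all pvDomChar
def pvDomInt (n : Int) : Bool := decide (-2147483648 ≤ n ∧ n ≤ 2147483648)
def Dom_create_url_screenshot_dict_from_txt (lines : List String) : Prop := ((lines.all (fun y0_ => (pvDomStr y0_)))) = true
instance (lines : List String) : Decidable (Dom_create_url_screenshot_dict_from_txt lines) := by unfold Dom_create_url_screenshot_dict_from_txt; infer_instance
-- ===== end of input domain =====

-- B groups by a split/dedup/per-key-scan decomposition instead of A's single-pass mutable dict; same return value.

-- ===== PORT A =====
-- one loop iteration of A: skip lines without " - ", else split once and append to the key's bucket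
def pvStepA (d : PySem.Dict String (List String)) (line : String) : PySem.Dict String (List String) :=
  if PySem.Str.isIn " - " line = false then d
  else
    match PySem.Str.splitMax? line " - " 1 with
    | some (key :: value :: _) =>
        let d' := if d.contains key then d else d.insert key []
        d'.modify key [] (fun vs => vs ++ [value])
    | _ => d

def create_url_screenshot_dict_from_txt (lines : List String) : List (String × List String) :=
  (lines.foldl pvStepA PySem.Dict.empty).items

-- ===== PORT B =====
-- B: tuple(line.split(" - ", 1)) for lines containing " - " (the filtered comprehension)
def pvSplitLine (line : String) : Option (String × String) :=
  if PySem.Str.isIn " - " line then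
    match PySem.Str.splitMax? line " - " 1 with
    | some (key :: value :: _) => some (key, value)
    | _ => none
  else none

def create_url_screenshot_dict_from_txt_alt (lines : List String) : List (String × List String) :=
  let pairs := lines.filterMap pvSplitLine
  (PySem.List.dedup (pairs.map (·.1))).map
    (fun key => (key, (pairs.filter (fun p => p.1 == key)).map (·.2)))

-- ===== PRECONDITION & SPEC =====
def Spec_create_url_screenshot_dict_from_txt (lines : List String) (out : List (String × List String)) : Prop := out = create_url_screenshot_dict_from_txt_alt lines
instance (lines : List String) (out : List (String × List String)) : Decidable (Spec_create_url_screenshot_dict_from_txt lines out) := by unfold Spec_create_url_screenshot_dict_from_txt; infer_instance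

-- ===== CLAIM (what is proved, stated in full; the proofs are below) =====
def Claim_equal_create_url_screenshot_dict_from_txt : Prop := ∀ (lines : List String), Dom_create_url_screenshot_dict_from_txt lines → Spec_create_url_screenshot_dict_from_txt lines (create_url_screenshot_dict_from_txt lines)

-- ===== LEMMAS AND PROOFS =====

-- inserting an empty bucket first and then modifying it is the same as modifying with default []
theorem pv_insert_modify (d : PySem.Dict String (List String)) (k : String)
    (f : List String → List String) (h : d.contains k = false) :
    (d.insert k []).modify k [] f = d.modify k [] f := by
  simp [PySem.Dict.modify, PySem.Dict.insert_insert_self, PySem.Dict.getD_insert_self,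
    PySem.Dict.getD_of_not_contains d [] h]

-- A's loop body in terms of B's line splitter
theorem pvStepA_eq (d : PySem.Dict String (List String)) (line : String) :
    pvStepA d line =
      match pvSplitLine line with
      | some p => d.modify p.1 [] (fun vs => vs ++ [p.2])
      | none => d := by
  unfold pvStepA pvSplitLine
  cases h : PySem.Str.isIn " - " line with
  | false => simp
  | true =>
    simp only [Bool.true_eq_false, if_false, if_true]
    cases hs : PySem.Str.splitMax? line " - " 1 with
    | none => simp
    | some l =>
      match l with
      | [] => simp
      | [_] => simp
      | key :: value :: rest =>
        by_cases hc : d.contains key = true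
        · simp [hc]
        · simp only [Bool.not_eq_true] at hc
          simp [hc, pv_insert_modify d key _ hc]

-- A's fold over lines is the grouping fold over the filtered pairs
theorem pv_foldl_eq (lines : List String) (d : PySem.Dict String (List String)) :
    lines.foldl pvStepA d =
      (lines.filterMap pvSplitLine).foldl
        (fun d p => d.modify p.1 [] (fun vs => vs ++ [p.2])) d := by
  induction lines generalizing d with
  | nil => rfl
  | cons line rest ih =>
    simp only [List.foldl_cons, List.filterMap_cons, pvStepA_eq]
    cases pvSplitLine line with
    | none => exact ih d
    | some p => simp only [List.foldl_cons]; exact ih _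

-- ===== VERDICT (by name: the statement is the Claim_ definition above) =====
theorem create_url_screenshot_dict_from_txt_spec : Claim_equal_create_url_screenshot_dict_from_txt := by
  intro lines _
  unfold Spec_create_url_screenshot_dict_from_txt
  unfold create_url_screenshot_dict_from_txt create_url_screenshot_dict_from_txt_alt
  rw [pv_foldl_eq]
  set pairs := lines.filterMap pvSplitLine with hp
  have hstep : (fun (d : PySem.Dict String (List String)) (p : String × String) =>
      d.modify p.1 [] (fun vs => vs ++ [p.2]))
      = fun d p => d.modify ((fun q : String × String => q.1) p) []
          ((fun (_ : PySem.Dict String (List String)) (p : String × String)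
              (vs : List String) => vs ++ [p.2]) d p) := rfl
  have hnd : (pairs.foldl (fun d p => d.modify p.1 [] (fun vs => vs ++ [p.2]))
      PySem.Dict.empty).keys.Nodup := by
    rw [hstep]
    exact PySem.Dict.nodup_keys_foldl_modify_key pairs _ _ _ _ PySem.Dict.nodup_keys_empty
  rw [PySem.Dict.items_eq_map_keys _ hnd []]
  have hkeys : (pairs.foldl (fun d p => d.modify p.1 [] (fun vs => vs ++ [p.2]))
      PySem.Dict.empty).keys = PySem.List.dedup (pairs.map (·.1)) := by
    rw [hstep, PySem.Dict.keys_foldl_modify_key]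
    simp [PySem.Set.update_nil_left, PySem.Dict.keys_empty]
  rw [hkeys]
  apply List.map_congr_left
  intro k _
  have := PySem.Dict.getD_foldl_modify_append pairs PySem.Dict.empty k
  simp only [PySem.Dict.getD_empty, List.nil_append] at this
  simp [this]
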